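-- pv_equiv track=rewrite | github.com/VishalDeoPrasad/InterviewBit | Closest MinMax.py | solve
-- ===== SOURCE A (Python) =====
-- def solve(A):
--     minn = min(A)
--     maxx = max(A)
--     min_list = []
--     max_list = []
--     for i in range(len(A)):
--         if A[i] == minn:
--             min_list.append(i)
--         if A[i] == maxx:
--             max_list.append(i)
--
--     ans = 9999999
--     for mn in min_list:
--         for mx in max_list:
--             if abs(mn-mx) < ans:
--                 ans = abs(mn-mx)
--     return ans+1
-- ===== SOURCE B (Python) =====
-- def solve(A):
--     minn = min(A)
--     maxx = max(A)
--     ans = 9999999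
--     li = -1
--     lj = -1
--     for i, x in enumerate(A):
--         if x == minn:
--             li = i
--             if lj >= 0 and i - lj < ans:
--                 ans = i - lj
--         if x == maxx:
--             lj = i
--             if li >= 0 and i - li < ans:
--                 ans = i - li
--     return ans + 1
-- ===== Notes on version B (the rewrite author's own statement) =====
-- stated objective: faster
-- what changed: Replaces the quadratic nested loop over all (min-index, max-index) pairs by a single pass that keeps the last seen min/max index and updates the best distance at each occurrence.
import Mathlib
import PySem

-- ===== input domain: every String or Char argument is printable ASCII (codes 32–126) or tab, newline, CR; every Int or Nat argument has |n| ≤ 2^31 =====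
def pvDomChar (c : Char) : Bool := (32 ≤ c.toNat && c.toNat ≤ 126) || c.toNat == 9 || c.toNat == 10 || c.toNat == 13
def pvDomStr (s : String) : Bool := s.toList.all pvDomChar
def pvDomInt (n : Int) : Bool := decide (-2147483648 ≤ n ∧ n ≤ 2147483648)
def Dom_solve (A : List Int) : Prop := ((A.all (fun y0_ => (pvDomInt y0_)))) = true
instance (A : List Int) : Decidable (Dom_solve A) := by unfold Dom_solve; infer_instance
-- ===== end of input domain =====

-- B replaces A's quadratic scan over all (min-index, max-index) pairs by one pass keeping the
-- last seen min/max index (objective: faster).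

-- ===== PORT A =====
-- loop body of A's first for-loop (i runs over range(len(A)); A[i] is in range)
def AStep (A : List Int) (minn maxx : Int) (p : List Int × List Int) (i : Int) :
    List Int × List Int :=
  let p1 := if PySem.List.pyGetD A i 0 = minn then (p.1 ++ [i], p.2) else p
  if PySem.List.pyGetD A i 0 = maxx then (p1.1, p1.2 ++ [i]) else p1

def solve (A : List Int) : Int :=
  match PySem.List.min? A (fun x => x), PySem.List.max? A (fun x => x) with
  | some minn, some maxx =>
      let ls := (PySem.List.pyRange 0 (PySem.List.len A) 1).foldl (AStep A minn maxx) ([], [])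
      let ans := ls.1.foldl (fun ans mn =>
          ls.2.foldl (fun ans mx => if |mn - mx| < ans then |mn - mx| else ans) ans) 9999999
      ans + 1
  | _, _ => 0   -- unreachable: min([]) raises ValueError, excluded by Pre_solve

-- ===== PORT B =====
-- loop body of B's single pass; state = (li, lj, ans), ix = (i, x) from enumerate(A)
def BStep (minn maxx : Int) (s : Int × Int × Int) (ix : Int × Int) : Int × Int × Int :=
  let s1 := if ix.2 = minn then
      (ix.1, s.2.1, if 0 ≤ s.2.1 ∧ ix.1 - s.2.1 < s.2.2 then ix.1 - s.2.1 else s.2.2)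
    else s
  if ix.2 = maxx then
      (s1.1, ix.1, if 0 ≤ s1.1 ∧ ix.1 - s1.1 < s1.2.2 then ix.1 - s1.1 else s1.2.2)
  else s1

def solve_alt (A : List Int) : Int :=
  match PySem.List.min? A (fun x => x) with
  | none => 0   -- unreachable: min([]) raises ValueError, excluded by Pre_solve
  | some minn =>
    match PySem.List.max? A (fun x => x) with
    | none => 0
    | some maxx =>
        ((PySem.List.enumerate A).foldl (BStep minn maxx) (-1, -1, 9999999)).2.2 + 1

-- ===== PRECONDITION & SPEC =====
-- Pre_ excludes only the empty list, on which A raises ValueError (min of empty sequence).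
def Pre_solve (A : List Int) : Prop := A ≠ []
instance (A : List Int) : Decidable (Pre_solve A) := by unfold Pre_solve; infer_instance
def pvWitness_solve : List Int := [1, 3, 2]

def Spec_solve (A : List Int) (out : Int) : Prop := out = solve_alt A
instance (A : List Int) (out : Int) : Decidable (Spec_solve A out) := by unfold Spec_solve; infer_instance

-- ===== CLAIM (what is proved, stated in full; the proofs are below) =====
def Claim_equal_solve : Prop := ∀ (A : List Int), Dom_solve A → Pre_solve A → Spec_solve A (solve A)

-- ===== LEMMAS AND PROOFS =====

-- indices (starting at k) of occurrences of v in l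
def mIdxs (v : Int) (k : Int) : List Int → List Int
  | [] => []
  | x :: t => (if x = v then [k] else []) ++ mIdxs v (k + 1) t

-- sentinel -1 ↦ [], a real index ↦ singleton
def optL (v : Int) : List Int := if 0 ≤ v then [v] else []

-- all pairwise distances |p - q|, p ∈ P, q ∈ Q (in A's nested-loop order)
def allD (P Q : List Int) : List Int := P.flatMap (fun p => Q.map (fun q => |p - q|))

lemma mem_mIdxs_lb {v k q : Int} {l : List Int} (h : q ∈ mIdxs v k l) : k ≤ q := by
  induction l generalizing k with
  | nil => simp [mIdxs] at h
  | cons x t ih =>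
      simp only [mIdxs, List.mem_append] at h
      rcases h with h | h
      · split at h <;> simp_all
      · have := ih h; omega

lemma mem_allD {p q : Int} {P Q : List Int} (hp : p ∈ P) (hq : q ∈ Q) : |p - q| ∈ allD P Q := by
  simp only [allD, List.mem_flatMap, List.mem_map]
  exact ⟨p, hp, q, hq, rfl⟩

lemma mem_allD_iff {x : Int} {P Q : List Int} :
    x ∈ allD P Q ↔ ∃ p ∈ P, ∃ q ∈ Q, x = |p - q| := by
  simp only [allD, List.mem_flatMap, List.mem_map]
  constructor
  · rintro ⟨p, hp, q, hq, rfl⟩; exact ⟨p, hp, q, hq, rfl⟩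
  · rintro ⟨p, hp, q, hq, rfl⟩; exact ⟨p, hp, q, hq, rfl⟩

lemma le_fm {c a : Int} {L : List Int} (hc : c ≤ a) (h : ∀ x ∈ L, c ≤ x) :
    c ≤ L.foldl min a := by
  rcases PySem.List.foldl_min_mem L a with h' | h'
  · rw [h']; exact hc
  · exact h _ h'

lemma fm_le_init (a : Int) (L : List Int) : L.foldl min a ≤ a :=
  (PySem.List.foldl_min_le L a).1

lemma fm_le_mem {x : Int} {L : List Int} (a : Int) (h : x ∈ L) : L.foldl min a ≤ x :=
  (PySem.List.foldl_min_le L a).2 x h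

-- generic form of A's first-loop body over (index, value) pairs
def EStep (minn maxx : Int) (p : List Int × List Int) (ix : Int × Int) : List Int × List Int :=
  let p1 := if ix.2 = minn then (p.1 ++ [ix.1], p.2) else p
  if ix.2 = maxx then (p1.1, p1.2 ++ [ix.1]) else p1

lemma E_lists (minn maxx : Int) (l : List Int) :
    ∀ (s : Int) (a1 a2 : List Int),
    (PySem.List.enumerate l s).foldl (EStep minn maxx) (a1, a2)
      = (a1 ++ mIdxs minn s l, a2 ++ mIdxs maxx s l) := by
  induction l with
  | nil => intro s a1 a2; simp [PySem.List.enumerate, mIdxs]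
  | cons x t ih =>
      intro s a1 a2
      rw [PySem.List.enumerate_cons, List.foldl_cons]
      by_cases h1 : x = minn <;> by_cases h2 : x = maxx
      · subst h1; subst h2
        simp [EStep, mIdxs, ih]
      · have hmm : ¬ minn = maxx := fun h => h2 (h1.trans h)
        simp [EStep, h1, h2, hmm, mIdxs, ih]
      · have hmm : ¬ maxx = minn := fun h => h1 (h2.trans h)
        simp [EStep, h1, h2, hmm, mIdxs, ih]
      · simp [EStep, h1, h2, mIdxs, ih]

-- A's first loop builds exactly the two index lists
lemma A_lists (A : List Int) (minn maxx : Int) :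
    (PySem.List.pyRange 0 (PySem.List.len A) 1).foldl (AStep A minn maxx) ([], [])
      = (mIdxs minn 0 A, mIdxs maxx 0 A) := by
  have h1 : (PySem.List.pyRange 0 (PySem.List.len A) 1).foldl (AStep A minn maxx) ([], [])
      = ((PySem.List.pyRange 0 (PySem.List.len A) 1).map
          (fun j => (j, PySem.List.pyGetD A j 0))).foldl (EStep minn maxx) ([], []) := by
    rw [List.foldl_map]
    rfl
  rw [h1, ← PySem.List.enumerate_eq_map_pyRange A 0, E_lists]
  simp

-- A's nested second loop is a fold of min over all pairwise distances
lemma fm_flat (g : Int → List Int) (P : List Int) :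
    ∀ (init : Int),
    P.foldl (fun a p => (g p).foldl min a) init = (P.flatMap g).foldl min init := by
  induction P with
  | nil => intro init; simp
  | cons p t ih => intro init; simp [List.foldl_cons, ih, List.foldl_append]

lemma nested_min (P Q : List Int) (init : Int) :
    P.foldl (fun ans mn =>
        Q.foldl (fun ans mx => if |mn - mx| < ans then |mn - mx| else ans) ans) init
      = (allD P Q).foldl min init := by
  have hinner : ∀ (mn a : Int),
      Q.foldl (fun ans mx => if |mn - mx| < ans then |mn - mx| else ans) a
        = (Q.map (fun mx => |mn - mx|)).foldl min a := by
    intro mn a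
    rw [List.foldl_map]
    apply PySem.List.foldl_congr_mem
    intro b x _
    rcases lt_or_ge (|mn - x|) b with h | h <;> simp [h, min_def] <;> omega

  calc P.foldl (fun ans mn =>
        Q.foldl (fun ans mx => if |mn - mx| < ans then |mn - mx| else ans) ans) init
      = P.foldl (fun a mn => ((fun p => Q.map (fun mx => |p - mx|)) mn).foldl min a) init := by
        apply PySem.List.foldl_congr_mem
        intro a mn _
        exact hinner mn a
    _ = (allD P Q).foldl min init := fm_flat _ P init

lemma mem_optL {p v : Int} : p ∈ optL v ↔ 0 ≤ v ∧ p = v := by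
  unfold optL; split_ifs with h <;> simp [h]

lemma optL_nonneg {v : Int} (h : 0 ≤ v) : optL v = [v] := by simp [optL, h]

lemma mIdxs_cons_pos {v k x : Int} {t : List Int} (h : x = v) :
    mIdxs v k (x :: t) = k :: mIdxs v (k + 1) t := by simp [mIdxs, h]

lemma mIdxs_cons_neg {v k x : Int} {t : List Int} (h : ¬ x = v) :
    mIdxs v k (x :: t) = mIdxs v (k + 1) t := by simp [mIdxs, h]

lemma fm_congr_set (a : Int) {L L' : List Int} (h : ∀ x, x ∈ L ↔ x ∈ L') :
    L.foldl min a = L'.foldl min a :=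
  le_antisymm
    (le_fm (fm_le_init a L) (fun x hx => fm_le_mem a ((h x).mpr hx)))
    (le_fm (fm_le_init a L') (fun x hx => fm_le_mem a ((h x).mp hx)))

lemma fm_allD_swap (a : Int) (P Q : List Int) :
    (allD P Q).foldl min a = (allD Q P).foldl min a := by
  apply fm_congr_set
  intro x
  constructor
  · intro hx; rcases mem_allD_iff.1 hx with ⟨p, hp, q, hq, rfl⟩
    rw [abs_sub_comm]; exact mem_allD hq hp
  · intro hx; rcases mem_allD_iff.1 hx with ⟨q, hq, p, hp, rfl⟩
    rw [abs_sub_comm]; exact mem_allD hp hq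

lemma fm_allD_both {a : Int} (s : Int) {P Q : List Int} (ha : 0 ≤ a)
    (hP : s ∈ P) (hQ : s ∈ Q) : (allD P Q).foldl min a = 0 := by
  apply le_antisymm
  · have h0 := fm_le_mem a (mem_allD hP hQ)
    simpa using h0
  · apply le_fm ha
    intro x hx
    rcases mem_allD_iff.1 hx with ⟨p, _, q, _, rfl⟩
    exact abs_nonneg _

-- the one-pass update at a fresh min occurrence s preserves the all-pairs minimum
lemma fm_eq_main (s li lj ans : Int) (MI MJ : List Int)
    (hli : li < s) (hlj : lj < s) (hs : 0 ≤ s) (hans : 0 ≤ ans)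
    (hpair : 0 ≤ li → 0 ≤ lj → ans ≤ |li - lj|)
    (hMJ : ∀ q ∈ MJ, s + 1 ≤ q) :
    (allD (s :: MI) (optL lj ++ MJ)).foldl min
        (if 0 ≤ lj ∧ s - lj < ans then s - lj else ans)
      = (allD (optL li ++ s :: MI) (optL lj ++ MJ)).foldl min ans := by
  have ha1le : (if 0 ≤ lj ∧ s - lj < ans then s - lj else ans) ≤ ans := by
    split_ifs <;> omega
  apply le_antisymm
  · apply le_fm
    · exact le_trans (fm_le_init _ _) ha1le
    · intro y hy
      rcases mem_allD_iff.1 hy with ⟨p, hp, q, hq, rfl⟩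
      rcases List.mem_append.1 hp with hp' | hp'
      · obtain ⟨hli0, hpe⟩ := mem_optL.1 hp'
        rcases List.mem_append.1 hq with hq' | hq'
        · obtain ⟨hlj0, hqe⟩ := mem_optL.1 hq'
          have hle : ans ≤ |p - q| := by rw [hpe, hqe]; exact hpair hli0 hlj0
          exact le_trans (le_trans (fm_le_init _ _) ha1le) hle
        · have hq1 : s + 1 ≤ q := hMJ q hq'
          have hmem : |s - q| ∈ allD (s :: MI) (optL lj ++ MJ) :=
            mem_allD (List.mem_cons_self) (List.mem_append.2 (Or.inr hq'))
          have h2 : |s - q| ≤ |p - q| := by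
            rw [abs_of_nonpos (by omega), abs_of_nonpos (by omega)]
            omega
          exact le_trans (fm_le_mem _ hmem) h2
      · exact fm_le_mem _ (mem_allD hp' hq)
  · apply le_fm
    · split_ifs with hc
      · have hmem : |s - lj| ∈ allD (optL li ++ s :: MI) (optL lj ++ MJ) :=
          mem_allD (by simp) (List.mem_append.2 (Or.inl (mem_optL.2 ⟨hc.1, rfl⟩)))
        have h0 := fm_le_mem ans hmem
        rwa [abs_of_nonneg (by omega)] at h0
      · exact fm_le_init _ _
    · intro y hy
      rcases mem_allD_iff.1 hy with ⟨p, hp, q, hq, rfl⟩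
      exact fm_le_mem _ (mem_allD (List.mem_append.2 (Or.inr hp)) hq)

-- key invariant of B's single pass
lemma B_invariant (minn maxx : Int) (l : List Int) :
    ∀ (s li lj ans : Int), li < s → lj < s → 0 ≤ s → 0 ≤ ans →
    (0 ≤ li → 0 ≤ lj → ans ≤ |li - lj|) →
    ((PySem.List.enumerate l s).foldl (BStep minn maxx) (li, lj, ans)).2.2
      = (allD (optL li ++ mIdxs minn s l) (optL lj ++ mIdxs maxx s l)).foldl min ans := by
  induction l with
  | nil =>
      intro s li lj ans hli hlj hs hans hpair
      by_cases h1 : 0 ≤ li <;> by_cases h2 : 0 ≤ lj <;>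
        simp [PySem.List.enumerate, mIdxs, optL, h1, h2, allD]
      exact hpair h1 h2
  | cons x t ih =>
      intro s li lj ans hli hlj hs hans hpair
      rw [PySem.List.enumerate_cons, List.foldl_cons]
      by_cases h1 : x = minn <;> by_cases h2 : x = maxx
      · -- x is both the min and the max value
        have hmm : minn = maxx := h1.symm.trans h2
        have hstep : BStep minn maxx (li, lj, ans) (s, x) = (s, s, 0) := by
          simp only [BStep, h1, hmm]
          split_ifs <;> simp only [Prod.mk.injEq, true_and, not_true, not_and, not_lt] at * <;>
            omega
        rw [hstep, ih (s+1) s s 0 (by omega) (by omega) (by omega) le_rfl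
              (fun _ _ => by simp)]
        have hl : (allD (optL s ++ mIdxs minn (s+1) t)
              (optL s ++ mIdxs maxx (s+1) t)).foldl min 0 = 0 :=
          fm_allD_both s le_rfl (by simp [optL, hs]) (by simp [optL, hs])
        have hr : (allD (optL li ++ mIdxs minn s (x :: t))
              (optL lj ++ mIdxs maxx s (x :: t))).foldl min ans = 0 :=
          fm_allD_both s hans (by simp [mIdxs, h1]) (by simp [mIdxs, h2])
        rw [hl, hr]
      · -- x = minn only
        have hmm : ¬ minn = maxx := fun h => h2 (h1.trans h)
        have ha1 : (0:Int) ≤ if 0 ≤ lj ∧ s - lj < ans then s - lj else ans := by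
          split_ifs <;> omega
        have hpair' : 0 ≤ (s:Int) → 0 ≤ lj →
            (if 0 ≤ lj ∧ s - lj < ans then s - lj else ans) ≤ |s - lj| := by
          intro _ hlj0
          rw [abs_of_nonneg (by omega)]
          split_ifs <;> omega
        have hstep : BStep minn maxx (li, lj, ans) (s, x)
            = (s, lj, if 0 ≤ lj ∧ s - lj < ans then s - lj else ans) := by
          simp [BStep, h1, hmm]
        rw [hstep,
          ih (s+1) s lj (if 0 ≤ lj ∧ s - lj < ans then s - lj else ans)
            (by omega) (by omega) (by omega) ha1 hpair',
          mIdxs_cons_pos h1, mIdxs_cons_neg h2, optL_nonneg hs, List.singleton_append]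
        exact fm_eq_main s li lj ans _ _ hli hlj hs hans hpair
          (fun q hq => mem_mIdxs_lb hq)
      · -- x = maxx only
        have hmm : ¬ maxx = minn := fun h => h1 (h2.trans h)
        have ha1 : (0:Int) ≤ if 0 ≤ li ∧ s - li < ans then s - li else ans := by
          split_ifs <;> omega
        have hpair' : 0 ≤ li → 0 ≤ (s:Int) →
            (if 0 ≤ li ∧ s - li < ans then s - li else ans) ≤ |li - s| := by
          intro hli0 _
          rw [abs_of_nonpos (by omega)]
          split_ifs <;> omega
        have hstep : BStep minn maxx (li, lj, ans) (s, x)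
            = (li, s, if 0 ≤ li ∧ s - li < ans then s - li else ans) := by
          simp [BStep, h2, hmm]
        rw [hstep,
          ih (s+1) li s (if 0 ≤ li ∧ s - li < ans then s - li else ans)
            (by omega) (by omega) (by omega) ha1 hpair',
          mIdxs_cons_neg h1, mIdxs_cons_pos h2, optL_nonneg hs, List.singleton_append]
        rw [fm_allD_swap, fm_allD_swap ans]
        have hpair2 : 0 ≤ lj → 0 ≤ li → ans ≤ |lj - li| := by
          intro a b; rw [abs_sub_comm]; exact hpair b a
        exact fm_eq_main s lj li ans _ _ hlj hli hs hans hpair2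
          (fun q hq => mem_mIdxs_lb hq)
      · -- x is neither
        have hstep : BStep minn maxx (li, lj, ans) (s, x) = (li, lj, ans) := by
          simp [BStep, h1, h2]
        rw [hstep, ih (s+1) li lj ans (by omega) (by omega) (by omega) hans hpair,
          mIdxs_cons_neg h1, mIdxs_cons_neg h2]

-- ===== VERDICT (by name: the statement is the Claim_ definition above) =====
theorem solve_spec : Claim_equal_solve := by
  intro A hdom hpre
  unfold Spec_solve
  rcases A with _ | ⟨a, t⟩
  · exact absurd rfl hpre
  unfold solve solve_alt
  rw [PySem.List.min?_id_cons, PySem.List.max?_id_cons]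
  simp only []
  rw [A_lists, nested_min]
  have hB := B_invariant (List.foldl min a t) (List.foldl max a t) (a :: t)
      0 (-1) (-1) 9999999 (by omega) (by omega) le_rfl (by omega)
      (fun h _ => absurd h (by omega))
  rw [hB]
  simp [optL]
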